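-- pv_equiv track=rewrite | github.com/farout101/random-codes | UCSY_AA/eg1.py | check_equal_ones_and_twos
-- ===== SOURCE A (Python) =====
-- def check_equal_ones_and_twos(input_string):
--     # Initialize the difference counter
--     difference = 0
--
--     # Iterate over each character in the input string
--     for symbol in input_string:
--         if symbol == '1':
--             difference += 1  # Increment difference if symbol is '1'
--         elif symbol == '2':
--             difference -= 1  # Decrement difference if symbol is '2'
--         elif symbol == '0':
--             break  # End marker encountered, stop processing
--
--     # Check the final difference after processing all symbols
--     if difference == 0:
--         return 1  # The string is accepted
--     else:
--         return 0  # The string is rejected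
-- ===== SOURCE B (Python) =====
-- def check_equal_ones_and_twos(input_string):
--     # Stack-cancellation: opposite symbols annihilate in pairs.
--     # Invariant: the stack is always homogeneous (all '1's or all '2's),
--     # so it is empty at the end iff the '1's and '2's before the first
--     # '0' pair off exactly.
--     stack = []
--     for symbol in input_string:
--         if symbol == '0':
--             break
--         if symbol == '1' or symbol == '2':
--             if stack and stack[-1] != symbol:
--                 stack.pop()
--             else:
--                 stack.append(symbol)
--     return 1 if not stack else 0
-- ===== Notes on version B (the rewrite author's own statement) =====
-- stated objective: alternative
-- what changed: Replaces the running signed-difference counter with a stack-cancellation matcher: each symbol before the end marker pops an opposite symbol off a stack or is pushed, and the string is accepted iff the stack ends empty (the stack stays homogeneous, so emptiness coincides with equal counts).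
import Mathlib
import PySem

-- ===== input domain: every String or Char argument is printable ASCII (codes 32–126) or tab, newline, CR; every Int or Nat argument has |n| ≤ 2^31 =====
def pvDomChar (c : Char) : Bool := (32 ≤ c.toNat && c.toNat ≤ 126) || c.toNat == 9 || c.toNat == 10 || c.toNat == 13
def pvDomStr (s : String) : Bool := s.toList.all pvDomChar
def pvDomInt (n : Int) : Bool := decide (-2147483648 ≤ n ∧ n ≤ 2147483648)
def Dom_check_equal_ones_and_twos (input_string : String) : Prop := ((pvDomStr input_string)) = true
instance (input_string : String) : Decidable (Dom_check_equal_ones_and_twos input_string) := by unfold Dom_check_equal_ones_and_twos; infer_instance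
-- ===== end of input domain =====

-- B replaces A's running signed-difference counter with a stack-cancellation matcher (opposite symbols annihilate in pairs); alternative algorithm, same cost.
-- ===== PORT A =====
-- A's for-loop with break, as structural recursion over the same state `difference`
def pvLoopA : List Char → Int → Int
  | [], difference => difference
  | symbol :: rest, difference =>
    if symbol = '1' then pvLoopA rest (difference + 1)
    else if symbol = '2' then pvLoopA rest (difference - 1)
    else if symbol = '0' then difference
    else pvLoopA rest difference

def check_equal_ones_and_twos (input_string : String) : Int :=
  let difference := pvLoopA input_string.toList 0
  if difference = 0 then 1 else 0

-- ===== PORT B =====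
-- B's for-loop over the stack state (top of the stack = head of the list, Python's list end)
def pvLoopB : List Char → List Char → List Char
  | [], stack => stack
  | symbol :: rest, stack =>
    if symbol = '0' then stack                            -- break
    else if symbol = '1' ∨ symbol = '2' then
      match stack with
      | top :: stack' =>
        if top ≠ symbol then pvLoopB rest stack'          -- stack.pop()
        else pvLoopB rest (symbol :: top :: stack')       -- stack.append(symbol)
      | [] => pvLoopB rest [symbol]                       -- stack.append(symbol)
    else pvLoopB rest stack

def check_equal_ones_and_twos_alt (input_string : String) : Int :=
  if pvLoopB input_string.toList [] = [] then 1 else 0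

-- ===== PRECONDITION & SPEC =====
def Spec_check_equal_ones_and_twos (input_string : String) (out : Int) : Prop := out = check_equal_ones_and_twos_alt input_string
instance (input_string : String) (out : Int) : Decidable (Spec_check_equal_ones_and_twos input_string out) := by unfold Spec_check_equal_ones_and_twos; infer_instance

-- ===== CLAIM (what is proved, stated in full; the proofs are below) =====
def Claim_equal_check_equal_ones_and_twos : Prop := ∀ (input_string : String), Dom_check_equal_ones_and_twos input_string → Spec_check_equal_ones_and_twos input_string (check_equal_ones_and_twos input_string)

-- ===== LEMMAS AND PROOFS =====
-- step lemmas
theorem sA1 (rest : List Char) (d : Int) : pvLoopA ('1'::rest) d = pvLoopA rest (d+1) := by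
  simp [pvLoopA]
theorem sA2 (rest : List Char) (d : Int) : pvLoopA ('2'::rest) d = pvLoopA rest (d-1) := by
  simp [pvLoopA]
theorem sA0 (rest : List Char) (d : Int) : pvLoopA ('0'::rest) d = d := by
  simp [pvLoopA]
theorem sAo (c : Char) (rest : List Char) (d : Int) (h1 : c ≠ '1') (h2 : c ≠ '2') (h0 : c ≠ '0') :
    pvLoopA (c::rest) d = pvLoopA rest d := by
  simp [pvLoopA, h1, h2, h0]
theorem sB0 (rest st : List Char) : pvLoopB ('0'::rest) st = st := by
  simp [pvLoopB]
theorem sBnil (c : Char) (rest : List Char) (h0 : c ≠ '0') (h12 : c = '1' ∨ c = '2') :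
    pvLoopB (c::rest) [] = pvLoopB rest [c] := by
  simp [pvLoopB, h0, h12]
theorem sBpop (c top : Char) (rest st' : List Char) (h0 : c ≠ '0') (h12 : c = '1' ∨ c = '2')
    (ht : top ≠ c) : pvLoopB (c::rest) (top::st') = pvLoopB rest st' := by
  simp [pvLoopB, h0, h12, ht]
theorem sBpush (c : Char) (rest st' : List Char) (h0 : c ≠ '0') (h12 : c = '1' ∨ c = '2') :
    pvLoopB (c::rest) (c::st') = pvLoopB rest (c::c::st') := by
  simp [pvLoopB, h0, h12]
theorem sBo (c : Char) (rest st : List Char) (h0 : c ≠ '0') (h1 : c ≠ '1') (h2 : c ≠ '2') :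
    pvLoopB (c::rest) st = pvLoopB rest st := by
  simp [pvLoopB, h0, h1, h2]

theorem pvLen_eq (st : List Char) (h : ∀ x ∈ st, x = '1' ∨ x = '2') :
    st.length = st.count '1' + st.count '2' := by
  induction st with
  | nil => simp
  | cons c rest ih =>
    have hc := h c (by simp)
    have hr := ih (fun x hx => h x (by simp [hx]))
    rcases hc with hc | hc <;> simp [hc, hr] <;> omega

theorem pvLoopB_empty (cs : List Char) : ∀ (st : List Char),
    (∀ x ∈ st, x = '1' ∨ x = '2') →
    (st.count '1' = 0 ∨ st.count '2' = 0) →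
    ((pvLoopB cs st = []) ↔ pvLoopA cs ((st.count '1' : Int) - st.count '2') = 0) := by
  induction cs with
  | nil =>
    intro st hmem hhom
    have hl := pvLen_eq st hmem
    simp only [pvLoopB, pvLoopA]
    rw [List.eq_nil_iff_length_eq_zero]
    omega
  | cons c rest ih =>
    intro st hmem hhom
    by_cases h0 : c = '0'
    · subst h0
      have hl := pvLen_eq st hmem
      rw [sB0, sA0, List.eq_nil_iff_length_eq_zero]
      omega
    · by_cases h12 : c = '1' ∨ c = '2'
      · rcases st with _ | ⟨top, st'⟩
        · rcases h12 with h1 | h2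
          · subst h1
            rw [sBnil '1' rest h0 (Or.inl rfl), sA1,
              ih ['1'] (by simp) (by decide),
              show ((List.count '1' ['1'] : Int) - List.count '2' ['1'])
                = ((List.count '1' ([]:List Char) : Int) - List.count '2' ([]:List Char)) + 1 from by decide]
          · subst h2
            rw [sBnil '2' rest h0 (Or.inr rfl), sA2,
              ih ['2'] (by simp) (by decide),
              show ((List.count '1' ['2'] : Int) - List.count '2' ['2'])
                = ((List.count '1' ([]:List Char) : Int) - List.count '2' ([]:List Char)) - 1 from by decide]
        · have htop := hmem top (by simp)
          have hmem' : ∀ x ∈ st', x = '1' ∨ x = '2' := fun x hx => hmem x (by simp [hx])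
          rcases h12 with h1 | h2
          · subst h1
            rcases htop with ht | ht
            · subst ht
              rw [sBpush '1' rest st' h0 (Or.inl rfl), sA1,
                ih ('1'::'1'::st')
                  (by intro x hx; simp only [List.mem_cons] at hx; rcases hx with h|h|h
                      · exact Or.inl h
                      · exact Or.inl h
                      · exact hmem' x h)
                  (by rcases hhom with h | h
                      · simp [List.count_cons] at h
                      · right; simpa [List.count_cons] using h),
                show ((List.count '1' ('1'::'1'::st') : Int) - List.count '2' ('1'::'1'::st'))
                  = ((List.count '1' ('1'::st') : Int) - List.count '2' ('1'::st')) + 1 from by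
                  simp [List.count_cons]; push_cast; ring]
            · subst ht
              rw [sBpop '1' '2' rest st' h0 (Or.inl rfl) (by decide), sA1,
                ih st' hmem'
                  (by rcases hhom with h | h
                      · left; simpa [List.count_cons] using h
                      · simp [List.count_cons] at h),
                show ((List.count '1' st' : Int) - List.count '2' st')
                  = ((List.count '1' ('2'::st') : Int) - List.count '2' ('2'::st')) + 1 from by
                  simp [List.count_cons]; push_cast; ring]
          · subst h2
            rcases htop with ht | ht
            · subst ht
              rw [sBpop '2' '1' rest st' h0 (Or.inr rfl) (by decide), sA2,
                ih st' hmem'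
                  (by rcases hhom with h | h
                      · simp [List.count_cons] at h
                      · right; simpa [List.count_cons] using h),
                show ((List.count '1' st' : Int) - List.count '2' st')
                  = ((List.count '1' ('1'::st') : Int) - List.count '2' ('1'::st')) - 1 from by
                  simp [List.count_cons]; push_cast; ring]
            · subst ht
              rw [sBpush '2' rest st' h0 (Or.inr rfl), sA2,
                ih ('2'::'2'::st')
                  (by intro x hx; simp only [List.mem_cons] at hx; rcases hx with h|h|h
                      · exact Or.inr h
                      · exact Or.inr h
                      · exact hmem' x h)
                  (by rcases hhom with h | h
                      · left; simpa [List.count_cons] using h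
                      · simp [List.count_cons] at h),
                show ((List.count '1' ('2'::'2'::st') : Int) - List.count '2' ('2'::'2'::st'))
                  = ((List.count '1' ('2'::st') : Int) - List.count '2' ('2'::st')) - 1 from by
                  simp [List.count_cons]; push_cast; ring]
      · have h12 : ¬c = '1' ∧ ¬c = '2' := ⟨fun h => h12 (Or.inl h), fun h => h12 (Or.inr h)⟩
        rw [sBo c rest _ h0 h12.1 h12.2, sAo c rest _ h12.1 h12.2 h0]
        exact ih st hmem hhom

-- ===== VERDICT (by name: the statement is the Claim_ definition above) =====
theorem check_equal_ones_and_twos_spec : Claim_equal_check_equal_ones_and_twos := by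
  intro s _
  unfold Spec_check_equal_ones_and_twos check_equal_ones_and_twos check_equal_ones_and_twos_alt
  have h := pvLoopB_empty s.toList [] (by simp) (by simp)
  simp only [List.count_nil, Nat.cast_zero, sub_zero] at h
  by_cases hz : pvLoopA s.toList 0 = 0
  · simp [hz, h.mpr hz]
  · have hne : ¬ pvLoopB s.toList [] = [] := fun he => hz (h.mp he)
    simp [hz, hne]
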